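-- pv_equiv track=rewrite | github.com/MaksymDel/skip_phrase_naive | scripts/util.py | process_line_skip_gram
-- ===== SOURCE A (Python) =====
-- def process_line_skip_gram(line, window_size=2):
--     words = line.split()
--
--     if len(words) < 2:
--         return None
--
--     skip_gram_examples = []
--     for i in range(len(words)):
--         try:
--             for j in reversed(range(window_size)):
--                 j += 1 # to make window index start at 1
--                 if (i - j) < 0:
--                     continue
--                 skip_gram_examples.append((words[i], words[i-j]))
--
--             for j in range(window_size):
--                 j += 1 # to make window index start at 1
--                 skip_gram_examples.append((words[i], words[i+j]))
--         except IndexError: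
--             pass
--
--     return skip_gram_examples
-- ===== SOURCE B (Python) =====
-- def process_line_skip_gram(line, window_size=2):
--     words = line.split()
--     n = len(words)
--     if n < 2:
--         return None
--     w = max(0, window_size)
--     left = []             # sliding buffer: up to w preceding words, oldest (farthest) first
--     buf = words[:w + 1]   # lookahead buffer: current word followed by up to w following words
--     pos = len(buf)        # next word index to feed into the lookahead buffer
--     out = []
--     while buf:
--         x = buf.pop(0)
--         for c in left:
--             out.append((x, c))
--         for c in buf:
--             out.append((x, c))
--         if pos < n:
--             buf.append(words[pos])
--             pos += 1
--         left.append(x)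
--         if len(left) > w:
--             left.pop(0)
--     return out
-- ===== Notes on version B (the rewrite author's own statement) =====
-- stated objective: alternative
-- what changed: Replaces A's per-position index arithmetic (two inner j-offset loops with a continue guard and a caught IndexError) by a streaming pass over two sliding buffers -- one holding up to w preceding words and a lookahead queue of the current word plus up to w following words -- emitting each word's pairs directly from the buffers, with no offset indexing or exception handling.
import Mathlib
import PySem

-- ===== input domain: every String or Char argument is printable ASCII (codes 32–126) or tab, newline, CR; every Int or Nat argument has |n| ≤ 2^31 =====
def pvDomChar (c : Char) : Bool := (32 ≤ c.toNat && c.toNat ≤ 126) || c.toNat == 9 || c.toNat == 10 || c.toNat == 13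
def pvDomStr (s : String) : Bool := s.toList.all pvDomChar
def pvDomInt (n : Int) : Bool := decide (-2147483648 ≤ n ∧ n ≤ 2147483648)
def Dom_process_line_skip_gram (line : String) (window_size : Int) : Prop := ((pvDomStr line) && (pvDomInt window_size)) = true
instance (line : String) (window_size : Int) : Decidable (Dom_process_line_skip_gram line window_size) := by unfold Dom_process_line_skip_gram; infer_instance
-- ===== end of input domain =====

-- B replaces A's offset-indexed inner loops (backward with a continue guard, forward stopped by a
-- caught IndexError) by a streaming pass over two sliding buffers; objective: alternative.

-- ===== PORT A =====
-- forward inner loop of A: appends until words[i+j] raises IndexError (pyGet? = none), which the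
-- surrounding 'except IndexError: pass' turns into keeping the list built so far
def pvAfwd (words : List String) (wi : String) (i : Int) :
    List Int → List (String × String) → List (String × String)
  | [], acc => acc
  | j :: rest, acc =>
    match PySem.List.pyGet? words (i + (j + 1)) with
    | some b => pvAfwd words wi i rest (acc ++ [(wi, b)])
    | none => acc

def process_line_skip_gram (line : String) (window_size : Int) : Option (List (String × String)) :=
  let words := PySem.Str.split₀ line
  if words.length < 2 then none
  else
    some ((PySem.List.pyRange 0 (words.length : Int) 1).foldl (fun acc i =>
      -- words[i] and words[i-j] are provably in range here, so pyGetD "" is exact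
      let acc := ((PySem.List.pyRange 0 window_size 1).reverse).foldl (fun acc j =>
        if i - (j + 1) < 0 then acc
        else acc ++ [(PySem.List.pyGetD words i "", PySem.List.pyGetD words (i - (j + 1)) "")]) acc
      pvAfwd words (PySem.List.pyGetD words i "") i (PySem.List.pyRange 0 window_size 1) acc) [])

-- ===== PORT B =====
-- the while-loop of Source B: left = up to w preceding words (farthest first), x :: buf = the
-- lookahead buffer (current word + up to w following words), pos = next word to feed into it
def pvLoop (words : List String) (w : Nat) :
    List String → List String → Nat → List (String × String) → List (String × String)
  | _, [], _, out => out
  | left, x :: buf, pos, out =>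
    let out := buf.foldl (fun acc c => acc ++ [(x, c)])
                 (left.foldl (fun acc c => acc ++ [(x, c)]) out)
    let left' := left ++ [x]
    let left'' := if w < left'.length then left'.tail else left'
    if _h : pos < words.length then
      -- words[pos] is in range here, so pyGetD "" is exact
      pvLoop words w left'' (buf ++ [PySem.List.pyGetD words (pos : Int) ""]) (pos + 1) out
    else
      pvLoop words w left'' buf pos out
  termination_by _ buf pos _ => buf.length + (words.length - pos)
  decreasing_by all_goals (simp only [List.length_append, List.length]; omega)

def process_line_skip_gram_alt (line : String) (window_size : Int) : Option (List (String × String)) :=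
  let words := PySem.Str.split₀ line
  let n : Int := words.length
  if n < 2 then none
  else
    let w : Nat := (max 0 window_size).toNat     -- w = max(0, window_size), a nonnegative int
    let buf := PySem.List.slice words none (some ((w : Int) + 1))   -- words[:w+1]
    some (pvLoop words w [] buf buf.length [])

-- ===== PRECONDITION & SPEC =====
def Spec_process_line_skip_gram (line : String) (window_size : Int) (out : Option (List (String × String))) : Prop := out = process_line_skip_gram_alt line window_size
instance (line : String) (window_size : Int) (out : Option (List (String × String))) : Decidable (Spec_process_line_skip_gram line window_size out) := by unfold Spec_process_line_skip_gram; infer_instance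

-- ===== CLAIM (what is proved, stated in full; the proofs are below) =====
def Claim_equal_process_line_skip_gram : Prop := ∀ (line : String) (window_size : Int), Dom_process_line_skip_gram line window_size → Spec_process_line_skip_gram line window_size (process_line_skip_gram line window_size)

-- ===== LEMMAS AND PROOFS =====

-- the pairs both programs emit for the word at position i, window W
def pvCanon (words : List String) (W i : Int) : List (String × String) :=
  (PySem.List.pyRange (max 0 (i - W)) i 1).map
      (fun k => (PySem.List.pyGetD words i "", PySem.List.pyGetD words k ""))
    ++ (PySem.List.pyRange (i + 1) (min (words.length : Int) (i + W + 1)) 1).map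
      (fun k => (PySem.List.pyGetD words i "", PySem.List.pyGetD words k ""))

-- A's backward inner loop emits exactly the window indices max(0,i-W) … i-1 in increasing order
theorem pvA_back_nat (words : List String) (w : String) (i : Int) (hi : 0 ≤ i) :
    ∀ (m : Nat) (acc : List (String × String)),
      ((PySem.List.pyRange 0 (m : Int) 1).reverse).foldl (fun acc j =>
          if i - (j + 1) < 0 then acc
          else acc ++ [(w, PySem.List.pyGetD words (i - (j + 1)) "")]) acc
      = acc ++ (PySem.List.pyRange (max 0 (i - (m : Int))) i 1).map
          (fun k => (w, PySem.List.pyGetD words k "")) := by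
  intro m
  induction m with
  | zero =>
    intro acc
    simp only [Nat.cast_zero]
    rw [PySem.List.pyRange_one_eq_nil (le_refl (0:Int)),
        PySem.List.pyRange_one_eq_nil (by omega : i ≤ max 0 (i - (0:Int)))]
    simp
  | succ m ih =>
    intro acc
    have hc : (((m+1 : Nat)) : Int) = (m : Int) + 1 := by push_cast; ring
    rw [hc, PySem.List.pyRange_one_succ_right (by positivity : (0:Int) ≤ (m:Int))]
    rw [List.reverse_append, List.reverse_singleton, List.singleton_append, List.foldl_cons]
    by_cases h : i - ((m : Int) + 1) < 0
    · rw [if_pos h, ih acc]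
      have : max 0 (i - ((m:Int))) = max 0 (i - ((m:Int) + 1)) := by omega
      rw [this]
    · rw [if_neg h, ih]
      have h1 : max 0 (i - ((m:Int) + 1)) = i - ((m:Int) + 1) := by omega
      have h2 : max 0 (i - (m:Int)) = i - (m:Int) := by omega
      rw [h1, h2, PySem.List.pyRange_one_cons (by omega : i - ((m:Int) + 1) < i)]
      have h3 : i - ((m:Int) + 1) + 1 = i - (m:Int) := by ring
      rw [h3, List.map_cons, List.append_assoc, List.singleton_append]

theorem pvA_back_eq (words : List String) (w : String) (i : Int) (hi : 0 ≤ i)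
    (W : Int) (acc : List (String × String)) :
      ((PySem.List.pyRange 0 W 1).reverse).foldl (fun acc j =>
          if i - (j + 1) < 0 then acc
          else acc ++ [(w, PySem.List.pyGetD words (i - (j + 1)) "")]) acc
      = acc ++ (PySem.List.pyRange (max 0 (i - W)) i 1).map
          (fun k => (w, PySem.List.pyGetD words k "")) := by
  by_cases hW : 0 ≤ W
  · have : W = ((W.toNat : Nat) : Int) := by omega
    rw [this]; exact pvA_back_nat words w i hi W.toNat acc
  · rw [PySem.List.pyRange_one_eq_nil (by omega : W ≤ 0),
        PySem.List.pyRange_one_eq_nil (by omega : i ≤ max 0 (i - W))]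
    simp

-- A's forward inner loop (terminated by the caught IndexError) emits indices i+1 … min(n,i+W+1)-1
theorem pvA_fwd_aux (words : List String) (w : String) (i W : Int) (hi0 : 0 ≤ i) :
    ∀ (m : Nat) (c : Int) (acc : List (String × String)), 0 ≤ c → (W - c).toNat = m →
      pvAfwd words w i (PySem.List.pyRange c W 1) acc
      = acc ++ (PySem.List.pyRange (i + c + 1) (min (words.length : Int) (i + W + 1)) 1).map
          (fun k => (w, PySem.List.pyGetD words k "")) := by
  intro m
  induction m with
  | zero =>
    intro c acc hc hm
    rw [PySem.List.pyRange_one_eq_nil (by omega : W ≤ c),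
        PySem.List.pyRange_one_eq_nil
          (by omega : min ((words.length : Int)) (i + W + 1) ≤ i + c + 1)]
    simp [pvAfwd]
  | succ m ih =>
    intro c acc hc hm
    rw [PySem.List.pyRange_one_cons (by omega : c < W)]
    show (match PySem.List.pyGet? words (i + (c + 1)) with
      | some b => pvAfwd words w i (PySem.List.pyRange (c+1) W 1) (acc ++ [(w, b)])
      | none => acc) = _
    by_cases hlt : i + c + 1 < (words.length : Int)
    · have hg : PySem.List.pyGet? words (i + (c + 1)) = some (words[(i + (c + 1)).toNat]) :=
        PySem.List.pyGet?_eq_some_getElem words (by omega) (by omega)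
      rw [hg]
      show pvAfwd words w i (PySem.List.pyRange (c+1) W 1) (acc ++ [(w, words[(i + (c + 1)).toNat])]) = _
      rw [ih (c+1) _ (by omega) (by omega)]
      rw [PySem.List.pyRange_one_cons
            (by omega : i + c + 1 < min ((words.length : Int)) (i + W + 1))]
      have h3 : i + (c + 1) + 1 = i + c + 1 + 1 := by ring
      rw [h3, List.map_cons, List.append_assoc, List.singleton_append]
      have h4 : PySem.List.pyGetD words (i + c + 1) "" = words[(i + (c + 1)).toNat] := by
        have := PySem.List.pyGet?_eq_some_getElem words (show (0:Int) ≤ i + c + 1 by omega) (by omega : i + c + 1 < (words.length : Int))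
        have he : (i + c + 1).toNat = (i + (c + 1)).toNat := by omega
        simp [PySem.List.pyGetD, this, he]
      rw [h4]
    · have hg : PySem.List.pyGet? words (i + (c + 1)) = none := by
        rw [PySem.List.pyGet?_eq_none_iff]
        simp [PySem.Raise.InRange]
        omega
      rw [hg]
      rw [PySem.List.pyRange_one_eq_nil
            (by omega : min ((words.length : Int)) (i + W + 1) ≤ i + c + 1)]
      simp

theorem pvA_fwd_eq (words : List String) (w : String) (i : Int) (hi : 0 ≤ i)
    (W : Int) (acc : List (String × String)) :
      pvAfwd words w i (PySem.List.pyRange 0 W 1) acc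
      = acc ++ (PySem.List.pyRange (i + 1) (min (words.length : Int) (i + W + 1)) 1).map
          (fun k => (w, PySem.List.pyGetD words k "")) := by
  have := pvA_fwd_aux words w i W hi (W - 0).toNat 0 acc (le_refl 0) rfl
  simpa using this

-- A's body is the flatMap of pvCanon over all positions
theorem pvA_eq_canon (words : List String) (W : Int) :
    (PySem.List.pyRange 0 (words.length : Int) 1).foldl (fun acc i =>
      let acc := ((PySem.List.pyRange 0 W 1).reverse).foldl (fun acc j =>
        if i - (j + 1) < 0 then acc
        else acc ++ [(PySem.List.pyGetD words i "", PySem.List.pyGetD words (i - (j + 1)) "")]) acc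
      pvAfwd words (PySem.List.pyGetD words i "") i (PySem.List.pyRange 0 W 1) acc) []
    = (PySem.List.pyRange 0 (words.length : Int) 1).flatMap (pvCanon words W) := by
  trans ((PySem.List.pyRange 0 (words.length : Int) 1).foldl
      (fun acc i => acc ++ pvCanon words W i) [])
  · apply PySem.List.foldl_congr_mem
    intro acc i hi
    rw [PySem.List.mem_pyRange_one] at hi
    simp only []
    rw [pvA_back_eq words _ i hi.1 W acc, pvA_fwd_eq words _ i hi.1 W, pvCanon,
        List.append_assoc]
  · rw [PySem.List.foldl_append_eq_flatMap]
    simp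

-- pvCanon only depends on the clamped window max(0,W)
theorem pvCanon_clamp (words : List String) (W i : Int) (_hi : 0 ≤ i) :
    pvCanon words W i = pvCanon words (max 0 W) i := by
  by_cases hW : 0 ≤ W
  · rw [max_eq_right hW]
  · unfold pvCanon
    rw [PySem.List.pyRange_one_eq_nil (by omega : i ≤ max 0 (i - W)),
        PySem.List.pyRange_one_eq_nil (by omega : i ≤ max 0 (i - max 0 W)),
        PySem.List.pyRange_one_eq_nil
          (by omega : min ((words.length : Int)) (i + W + 1) ≤ i + 1),
        PySem.List.pyRange_one_eq_nil
          (by omega : min ((words.length : Int)) (i + max 0 W + 1) ≤ i + 1)]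

-- a map over a range of in-bounds indices is a map over the corresponding sublist
theorem pvRangeMap (words : List String) (x : String) (a b : Nat) (hb : b ≤ words.length) :
    (PySem.List.pyRange (a : Int) (b : Int) 1).map
        (fun k => (x, PySem.List.pyGetD words k ""))
      = ((words.take b).drop a).map (fun c => (x, c)) := by
  apply List.ext_getElem
  · simp [PySem.List.length_pyRange_one]
    omega
  · intro k h1 h2
    simp only [List.getElem_map, PySem.List.getElem_pyRange_one, List.getElem_drop,
      List.getElem_take]
    have hk : a + k < words.length := by
      simp [PySem.List.length_pyRange_one] at h1
      omega
    have hc : (a : Int) + (k : Int) = ((a + k : Nat) : Int) := by push_cast; ring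
    rw [hc, PySem.List.pyGetD_ofNat words (a + k) "" hk]

-- B's loop invariant: at position k the two buffers are windows of words around k
theorem pvLoop_inv (words : List String) (w : Nat) :
    ∀ (m k : Nat) (out : List (String × String)), k ≤ words.length → m = words.length - k →
      pvLoop words w ((words.take k).drop (k - w))
        ((words.take (min words.length (k + w + 1))).drop k) (min words.length (k + w + 1)) out
      = out ++ (PySem.List.pyRange (k : Int) (words.length : Int) 1).flatMap
          (pvCanon words (w : Int)) := by
  intro m
  induction m with
  | zero =>
    intro k out hk hm
    have hkn : k = words.length := by omega
    subst hkn
    have hmin : min words.length (words.length + w + 1) = words.length := by omega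
    rw [hmin]
    have hbuf : (words.take words.length).drop words.length = [] := by
      apply List.drop_eq_nil_of_le; simp
    rw [hbuf, PySem.List.pyRange_one_eq_nil (le_refl _)]
    simp [pvLoop]
  | succ m ih =>
    intro k out hk hm
    have hkn : k < words.length := by omega
    set n := words.length with hn
    set p := min n (k + w + 1) with hp
    have hkp : k < p := by omega
    have hpn : p ≤ n := by omega
    have hlenp : (words.take p).length = p := by rw [List.length_take]; omega
    have hbuf : (words.take p).drop k
        = words[k] :: (words.take p).drop (k + 1) := by
      rw [List.drop_eq_getElem_cons (by omega : k < (words.take p).length)]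
      congr 1
      exact List.getElem_take
    rw [hbuf, pvLoop]
    rw [PySem.List.foldl_append_singleton_eq_map,
        PySem.List.foldl_append_singleton_eq_map, List.append_assoc]
    -- the emitted pairs are exactly pvCanon at position k
    have hcenter : PySem.List.pyGetD words (k : Int) "" = words[k] :=
      PySem.List.pyGetD_ofNat words k "" hkn
    have hcanon : pvCanon words (w : Int) (k : Int)
        = ((words.take k).drop (k - w)).map (fun c => (words[k], c))
          ++ ((words.take p).drop (k + 1)).map (fun c => (words[k], c)) := by
      unfold pvCanon
      rw [hcenter]
      have e1 : max 0 ((k : Int) - (w : Int)) = ((k - w : Nat) : Int) := by omega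
      have e2 : (k : Int) + 1 = ((k + 1 : Nat) : Int) := by push_cast; ring
      have e3 : min ((words.length : Int)) ((k : Int) + (w : Int) + 1) = ((p : Nat) : Int) := by
        rw [hp, hn]; push_cast; omega
      rw [e1, e2, e3, pvRangeMap words _ (k - w) k (by omega),
          pvRangeMap words _ (k + 1) p hpn]
    -- the updated preceding-words buffer is the window around k+1
    have hleft1 : (words.take k).drop (k - w) ++ [words[k]]
        = (words.take (k + 1)).drop (k - w) := by
      rw [List.take_add_one]
      have : words[k]?.toList = [words[k]] := by
        rw [List.getElem?_eq_getElem hkn]; rfl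
      rw [this, List.drop_append_of_le_length (by simp; omega)]
    have hleft2 : (if w < ((words.take k).drop (k - w) ++ [words[k]]).length
          then ((words.take k).drop (k - w) ++ [words[k]]).tail
          else (words.take k).drop (k - w) ++ [words[k]])
        = (words.take (k + 1)).drop ((k + 1) - w) := by
      rw [hleft1]
      have hlen : ((words.take (k + 1)).drop (k - w)).length = min (k + 1) n - (k - w) := by
        simp [hn]
      by_cases hcase : w ≤ k
      · rw [if_pos (by rw [hlen]; omega), List.tail_drop]
        congr 1
        omega
      · rw [if_neg (by rw [hlen]; omega)]
        congr 1
        omega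
    rw [hleft2]
    have hrest : (PySem.List.pyRange (k : Int) ((n : Nat) : Int) 1).flatMap (pvCanon words (w : Int))
        = pvCanon words (w : Int) (k : Int)
          ++ (PySem.List.pyRange ((k + 1 : Nat) : Int) ((n : Nat) : Int) 1).flatMap
              (pvCanon words (w : Int)) := by
      have e : ((k : Int) + 1) = ((k + 1 : Nat) : Int) := by push_cast; ring
      rw [PySem.List.pyRange_one_cons (by exact_mod_cast hkn), e, List.flatMap_cons]
    by_cases hpl : p < words.length
    · have hmin1 : min n ((k + 1) + w + 1) = p + 1 := by omega
      have hbuf2 : (words.take p).drop (k + 1) ++ [PySem.List.pyGetD words (p : Int) ""]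
          = (words.take (p + 1)).drop (k + 1) := by
        rw [PySem.List.pyGetD_ofNat words p "" hpl, List.take_add_one]
        have hg : words[p]?.toList = [words[p]] := by
          rw [List.getElem?_eq_getElem hpl]; rfl
        rw [hg, List.drop_append_of_le_length (by rw [hlenp]; omega)]
      have happ := fun out => ih (k + 1) out (by omega : k + 1 ≤ n) (by omega)
      rw [hmin1] at happ
      rw [dif_pos hpl, hbuf2, happ, hrest, hcanon]
      simp [List.append_assoc]
    · have hmin1 : min n ((k + 1) + w + 1) = p := by omega
      have happ := fun out => ih (k + 1) out (by omega : k + 1 ≤ n) (by omega)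
      rw [hmin1] at happ
      rw [dif_neg hpl, happ, hrest, hcanon]
      simp [List.append_assoc]

-- ===== VERDICT (by name: the statement is the Claim_ definition above) =====
theorem process_line_skip_gram_spec : Claim_equal_process_line_skip_gram := by
  intro line window_size _
  show process_line_skip_gram line window_size = process_line_skip_gram_alt line window_size
  unfold process_line_skip_gram process_line_skip_gram_alt
  set words := PySem.Str.split₀ line with hw
  by_cases h : words.length < 2
  · simp [h]
    omega
  · simp only [h, if_false]
    have h2 : ¬ ((words.length : Int) < 2) := by omega
    rw [if_neg h2]
    congr 1
    rw [pvA_eq_canon]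
    have hflat : (PySem.List.pyRange 0 (words.length : Int) 1).flatMap (pvCanon words window_size)
        = (PySem.List.pyRange 0 (words.length : Int) 1).flatMap
            (pvCanon words (((max 0 window_size).toNat : Nat) : Int)) := by
      apply List.flatMap_congr
      intro i hi
      rw [PySem.List.mem_pyRange_one] at hi
      rw [pvCanon_clamp words window_size i hi.1]
      congr 1
      omega
    rw [hflat]
    set w : Nat := (max 0 window_size).toNat with hwdef
    have hsl : PySem.List.slice words none (some ((w : Int) + 1))
        = words.take (w + 1) := by
      have : ((w : Int) + 1) = ((w + 1 : Nat) : Int) := by push_cast; ring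
      rw [this, PySem.List.slice_to_natCast]
    rw [hsl]
    have htk : words.take (w + 1) = words.take (min words.length (w + 1)) := by
      rw [min_comm, ← List.take_take, List.take_length]
    have hlen : (words.take (w + 1)).length = min words.length (w + 1) := by
      simp [min_comm]
    rw [htk]
    rw [show (words.take (min words.length (w + 1))).length = min words.length (0 + w + 1) by
          rw [List.length_take]; omega]
    rw [show min words.length (w + 1) = min words.length (0 + w + 1) by omega]
    have hinv := pvLoop_inv words w (words.length - 0) 0 [] (by omega) rfl
    simp only [Nat.cast_zero, List.take_zero, List.drop_nil, List.nil_append] at hinv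
    exact hinv.symm
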